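-- pv_equiv track=rewrite | github.com/kavindacena99/RAG_projects | backend/rag/services/generation_service.py | _chunk_text_for_streaming
-- ===== SOURCE A (Python) =====
-- def _chunk_text_for_streaming(text: str, words_per_chunk: int = 8):
--     words = text.split()
--     buffer = []
--     for word in words:
--         buffer.append(word)
--         if len(buffer) >= words_per_chunk:
--             yield " ".join(buffer) + " "
--             buffer = []
--     if buffer:
--         yield " ".join(buffer)
-- ===== SOURCE B (Python) =====
-- def _chunk_text_for_streaming(text: str, words_per_chunk: int = 8):
--     # Recursive strided slicing over chunk boundaries instead of an
--     # append-to-buffer-and-flush loop.  A flushes after every single word when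
--     # words_per_chunk <= 0, which is exactly a stride of 1.
--     step = max(words_per_chunk, 1)
--
--     def go(words):
--         if not words:
--             return
--         if len(words) >= step:
--             yield " ".join(words[:step]) + " "
--             yield from go(words[step:])
--         else:
--             yield " ".join(words)
--
--     yield from go(text.split())
-- ===== Notes on version B (the rewrite author's own statement) =====
-- stated objective: alternative
-- what changed: Replaced A's append-to-buffer-and-flush-on-full fold with a recursive generator that slices the word list in strides of max(words_per_chunk,1), which also covers A's flush-every-word behaviour for non-positive chunk sizes without a special case.
import Mathlib
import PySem

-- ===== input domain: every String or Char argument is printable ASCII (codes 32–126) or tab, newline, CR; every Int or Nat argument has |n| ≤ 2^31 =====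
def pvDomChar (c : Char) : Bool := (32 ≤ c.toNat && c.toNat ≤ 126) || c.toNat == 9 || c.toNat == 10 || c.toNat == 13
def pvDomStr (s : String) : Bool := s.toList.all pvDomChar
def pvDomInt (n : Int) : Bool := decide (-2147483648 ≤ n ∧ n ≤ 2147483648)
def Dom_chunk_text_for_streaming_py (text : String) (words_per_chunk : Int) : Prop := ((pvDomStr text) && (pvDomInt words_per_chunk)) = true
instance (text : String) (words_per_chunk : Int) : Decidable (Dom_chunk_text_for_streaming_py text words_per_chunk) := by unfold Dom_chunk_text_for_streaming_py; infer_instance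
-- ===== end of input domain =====

-- B replaces A's buffer-accumulate-and-flush loop by recursive strided slicing
-- of the word list (stride max(words_per_chunk,1)); alternative decomposition, same cost.


-- ===== PORT A =====
-- one loop iteration of A: append the word to the buffer, flush if full
def pvStepA (words_per_chunk : Int) (st : List String × List String) (word : String) :
    List String × List String :=
  let buffer := st.2 ++ [word]
  if (buffer.length : Int) ≥ words_per_chunk then
    (st.1 ++ [PySem.Str.join " " buffer ++ " "], [])
  else
    (st.1, buffer)

def chunk_text_for_streaming_py (text : String) (words_per_chunk : Int) : List String :=
  let words := PySem.Str.split₀ text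
  let st := words.foldl (pvStepA words_per_chunk) ([], [])
  if st.2 ≠ [] then st.1 ++ [PySem.Str.join " " st.2] else st.1

-- ===== PORT B =====
-- Source B's recursive generator go(words); called only with step ≥ 1.  The slices
-- words[:step] / words[step:] are written on the tail (take/drop (step-1) after the
-- head), which is exact for step ≥ 1 and makes the recursion visibly decreasing.
def pvAltGo (step : Nat) : List String → List String
  | [] => []
  | w :: ws =>
    if step ≤ ws.length + 1 then
      (PySem.Str.join " " (w :: ws.take (step - 1)) ++ " ") :: pvAltGo step (ws.drop (step - 1))
    else
      [PySem.Str.join " " (w :: ws)]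
termination_by l => l.length
decreasing_by
  simp only [List.length_drop, List.length_cons]
  omega

def chunk_text_for_streaming_py_alt (text : String) (words_per_chunk : Int) : List String :=
  let step : Int := max words_per_chunk 1
  pvAltGo step.toNat (PySem.Str.split₀ text)

-- ===== PRECONDITION & SPEC =====
def Spec_chunk_text_for_streaming_py (text : String) (words_per_chunk : Int) (out : List String) : Prop := out = chunk_text_for_streaming_py_alt text words_per_chunk
instance (text : String) (words_per_chunk : Int) (out : List String) : Decidable (Spec_chunk_text_for_streaming_py text words_per_chunk out) := by unfold Spec_chunk_text_for_streaming_py; infer_instance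

-- ===== CLAIM (what is proved, stated in full; the proofs are below) =====
def Claim_equal_chunk_text_for_streaming_py : Prop := ∀ (text : String) (words_per_chunk : Int), Dom_chunk_text_for_streaming_py text words_per_chunk → Spec_chunk_text_for_streaming_py text words_per_chunk (chunk_text_for_streaming_py text words_per_chunk)

-- ===== LEMMAS AND PROOFS =====

theorem pvAltGo_ge (step : Nat) (hs : 1 ≤ step) (l : List String)
    (hne : l ≠ []) (hlen : step ≤ l.length) :
    pvAltGo step l
      = (PySem.Str.join " " (l.take step) ++ " ") :: pvAltGo step (l.drop step) := by
  cases l with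
  | nil => exact absurd rfl hne
  | cons w ws =>
    obtain ⟨m, rfl⟩ : ∃ m, step = m + 1 := ⟨step - 1, by omega⟩
    simp only [List.length_cons] at hlen
    rw [pvAltGo]
    simp [List.take_succ_cons, List.drop_succ_cons]
    omega

theorem pvAltGo_lt (step : Nat) (l : List String)
    (hne : l ≠ []) (hlen : l.length < step) :
    pvAltGo step l = [PySem.Str.join " " l] := by
  cases l with
  | nil => exact absurd rfl hne
  | cons w ws =>
    simp only [List.length_cons] at hlen
    rw [pvAltGo]
    simp
    omega

-- loop invariant: A's fold, started on leftover buffer `buf` (strictly shorter than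
-- a chunk) and already-emitted chunks `out`, ends up at `out` followed by B's
-- strided chunking of `buf ++ ws`.
theorem pvFold_eq (n : Int) (ws : List String) :
    ∀ (out buf : List String), buf.length < (max n 1).toNat →
    (let st := ws.foldl (pvStepA n) (out, buf);
      if st.2 ≠ [] then st.1 ++ [PySem.Str.join " " st.2] else st.1)
      = out ++ pvAltGo (max n 1).toNat (buf ++ ws) := by
  induction ws with
  | nil =>
    intro out buf hbuf
    by_cases hb : buf = []
    · subst hb; simp [pvAltGo]
    · simp only [List.foldl_nil, List.append_nil]
      rw [pvAltGo_lt _ _ hb hbuf]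
      simp [hb]
  | cons w ws ih =>
    intro out buf hbuf
    simp only [List.foldl_cons]
    have hk1 : 1 ≤ (max n 1).toNat := by omega
    by_cases hc : ((buf ++ [w]).length : Int) ≥ n
    · have hc' : n ≤ (buf.length : Int) + 1 := by
        simp only [List.length_append, List.length_cons, List.length_nil, ge_iff_le] at hc
        push_cast at hc ⊢
        omega
      have hkeq : (max n 1).toNat = buf.length + 1 := by omega
      have hstep : pvStepA n (out, buf) w
          = (out ++ [PySem.Str.join " " (buf ++ [w]) ++ " "], []) := by
        simp [pvStepA, hc']
      rw [hstep]
      have hassoc : buf ++ w :: ws = (buf ++ [w]) ++ ws := by simp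
      have hlen2 : (buf ++ [w]).length = (max n 1).toNat := by simp [hkeq]
      have htake : ((buf ++ [w]) ++ ws).take ((max n 1).toNat) = buf ++ [w] := by
        rw [← hlen2, List.take_left]
      have hdrop : ((buf ++ [w]) ++ ws).drop ((max n 1).toNat) = ws := by
        rw [← hlen2, List.drop_left]
      conv_rhs =>
        rw [hassoc,
          pvAltGo_ge _ hk1 _ (by simp)
            (by simp only [List.length_append, List.length_cons, List.length_nil, hkeq]; omega),
          htake, hdrop]
      rw [ih _ [] (by simp only [List.length_nil]; omega)]
      simp
    · have hc2 : (buf.length : Int) + 1 < n := by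
        simp only [List.length_append, List.length_cons, List.length_nil, ge_iff_le,
          not_le] at hc
        push_cast at hc ⊢
        omega
      have hklt : (buf ++ [w]).length < (max n 1).toNat := by
        simp only [List.length_append, List.length_cons, List.length_nil]
        omega
      have hstep : pvStepA n (out, buf) w = (out, buf ++ [w]) := by
        simp [pvStepA]
        omega
      rw [hstep, ih _ _ hklt]
      simp

-- ===== VERDICT (by name: the statement is the Claim_ definition above) =====
theorem chunk_text_for_streaming_py_spec : Claim_equal_chunk_text_for_streaming_py := by
  intro text n _
  unfold Spec_chunk_text_for_streaming_py
  unfold chunk_text_for_streaming_py chunk_text_for_streaming_py_alt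
  have := pvFold_eq n (PySem.Str.split₀ text) [] [] (by simp only [List.length_nil]; omega)
  simpa using this
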